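-- pv_equiv track=rewrite | github.com/dunkdunkdunk/ComProg1 | 09_MoreDC_33.py | pattern3
-- ===== SOURCE A (Python) =====
-- def pattern3(N):
--     ans,zero,j=[],0,1
--     for i in range(1,N+1):
--         k,count=[],1
--         for r in range(zero):
--                 k.append(0)
--                 count+=1
--         while count<=N:
--             k.append(j)
--             j+=1
--             count+=1
--         ans.append(k)
--         zero+=1
--     return ans
-- ===== SOURCE B (Python) =====
-- def pattern3(N):
--     return [[0] * i + list(range(1 + i * N - i * (i - 1) // 2,
--                                  1 + i * N - i * (i - 1) // 2 + N - i))
--             for i in range(N)]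
-- ===== Notes on version B (the rewrite author's own statement) =====
-- stated objective: alternative
-- what changed: Replaces the threaded running counter j and the element-by-element zero/number inner loops with a closed-form per-row start index (triangular-number formula), building each row by list repetition and a single range call.
import Mathlib
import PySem

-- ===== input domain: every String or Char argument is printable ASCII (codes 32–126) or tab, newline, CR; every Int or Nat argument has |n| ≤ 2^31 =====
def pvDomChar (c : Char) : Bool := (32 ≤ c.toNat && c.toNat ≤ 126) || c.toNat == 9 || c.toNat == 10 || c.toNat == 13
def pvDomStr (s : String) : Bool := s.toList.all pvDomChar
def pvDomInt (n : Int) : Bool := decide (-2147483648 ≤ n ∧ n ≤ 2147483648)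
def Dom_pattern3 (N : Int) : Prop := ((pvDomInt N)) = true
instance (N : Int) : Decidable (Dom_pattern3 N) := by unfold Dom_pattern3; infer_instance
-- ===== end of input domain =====

-- B replaces A's threaded counters and inner loops by a per-row closed-form start index (alternative decomposition; same output).

-- ===== PORT A =====
-- while count <= N: k.append(j); j += 1; count += 1   (returns final k and j)
def pattern3While (N : Int) (k : List Int) (j count : Int) : List Int × Int :=
  if count ≤ N then pattern3While N (k ++ [j]) (j + 1) (count + 1) else (k, j)
termination_by (N + 1 - count).toNat
decreasing_by omega

def pattern3 (N : Int) : List (List Int) :=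
  -- ans, zero, j = [], 0, 1; for i in range(1, N+1): …
  (PySem.List.pyRange 1 (N + 1) 1).foldl
    (fun (s : List (List Int) × Int × Int) _i =>
      let ans := s.1; let zero := s.2.1; let j := s.2.2
      -- k, count = [], 1; for r in range(zero): k.append(0); count += 1
      let kc := (PySem.List.pyRange 0 zero 1).foldl
        (fun (p : List Int × Int) _r => (p.1 ++ [0], p.2 + 1)) ([], 1)
      let kj := pattern3While N kc.1 j kc.2
      (ans ++ [kj.1], zero + 1, kj.2))
    ([], 0, 1) |>.1

-- ===== PORT B =====
def pattern3_alt (N : Int) : List (List Int) :=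
  (PySem.List.pyRange 0 N 1).map (fun i =>
    PySem.List.pyRepeat [0] i ++
    PySem.List.pyRange (1 + i * N - PySem.Int.floordiv (i * (i - 1)) 2)
      (1 + i * N - PySem.Int.floordiv (i * (i - 1)) 2 + N - i) 1)

-- ===== PRECONDITION & SPEC =====
def Spec_pattern3 (N : Int) (out : List (List Int)) : Prop := out = pattern3_alt N
instance (N : Int) (out : List (List Int)) : Decidable (Spec_pattern3 N out) := by unfold Spec_pattern3; infer_instance

-- ===== CLAIM (what is proved, stated in full; the proofs are below) =====
def Claim_equal_pattern3 : Prop := ∀ (N : Int), Dom_pattern3 N → Spec_pattern3 N (pattern3 N)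

-- ===== LEMMAS AND PROOFS =====

-- B's row i, abbreviated (start = closed-form running counter)
def rowB (N i : Int) : List Int :=
  PySem.List.pyRepeat [0] i ++
  PySem.List.pyRange (1 + i * N - PySem.Int.floordiv (i * (i - 1)) 2)
    (1 + i * N - PySem.Int.floordiv (i * (i - 1)) 2 + N - i) 1

-- closed form of the running counter j before processing row i
def startJ (N i : Int) : Int := 1 + i * N - PySem.Int.floordiv (i * (i - 1)) 2

theorem startJ_succ (N i : Int) : startJ N (i + 1) = startJ N i + (N - i) := by
  unfold startJ
  rw [PySem.Int.floordiv_eq_ediv_of_pos (a := i * (i - 1)) (by norm_num),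
      PySem.Int.floordiv_eq_ediv_of_pos (a := (i + 1) * (i + 1 - 1)) (by norm_num)]
  have h : (i + 1) * (i + 1 - 1) = i * (i - 1) + i * 2 := by ring
  rw [h, Int.add_mul_ediv_right _ _ (by norm_num : (2:Int) ≠ 0)]
  ring

-- the zeros loop appends one 0 per element and counts them
theorem zeros_loop (l : List Int) (k : List Int) (c : Int) :
    l.foldl (fun (p : List Int × Int) _r => (p.1 ++ [0], p.2 + 1)) (k, c)
      = (k ++ List.replicate l.length 0, c + l.length) := by
  induction l generalizing k c with
  | nil => simp
  | cons x xs ih =>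
      simp only [List.foldl_cons, ih, List.length_cons, Prod.mk.injEq]
      refine ⟨?_, by push_cast; ring⟩
      rw [List.append_assoc]
      simp [List.replicate_succ]

-- the while loop appends range(j, j + (N+1-count)) and advances j by the same amount
theorem while_loop (N : Int) (k : List Int) (j count : Int) :
    pattern3While N k j count
      = (k ++ PySem.List.pyRange j (j + ((N + 1 - count).toNat : Int)) 1,
         j + ((N + 1 - count).toNat : Int)) := by
  generalize hn : (N + 1 - count).toNat = n
  induction n generalizing k j count with
  | zero =>
      rw [pattern3While]
      have hc : ¬ count ≤ N := by omega
      rw [if_neg hc]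
      simp [PySem.List.pyRange_one_eq_nil (le_refl j)]
  | succ m ih =>
      have hc : count ≤ N := by omega
      rw [pattern3While, if_pos hc, ih _ _ _ (by omega)]
      have h1 : (j + 1) + (m : Int) = j + ((m + 1 : Nat) : Int) := by push_cast; ring
      rw [h1]
      have h2 : PySem.List.pyRange j (j + ((m + 1 : Nat) : Int)) 1
          = j :: PySem.List.pyRange (j + 1) (j + ((m + 1 : Nat) : Int)) 1 :=
        PySem.List.pyRange_one_cons (by push_cast; omega)
      rw [h2]
      simp [List.append_assoc]

-- outer-loop invariant: after i iterations the state is (B's first i rows, i, startJ N i)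
theorem outer_loop (N : Int) (l : List Int) (hl : (l.length : Int) ≤ N) :
    l.foldl
      (fun (s : List (List Int) × Int × Int) _i =>
        let ans := s.1; let zero := s.2.1; let j := s.2.2
        let kc := (PySem.List.pyRange 0 zero 1).foldl
          (fun (p : List Int × Int) _r => (p.1 ++ [0], p.2 + 1)) ([], 1)
        let kj := pattern3While N kc.1 j kc.2
        (ans ++ [kj.1], zero + 1, kj.2))
      ([], 0, 1)
      = ((PySem.List.pyRange 0 (l.length : Int) 1).map (rowB N),
         (l.length : Int), startJ N (l.length : Int)) := by
  induction l using List.reverseRecOn with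
  | nil =>
      simp only [List.foldl_nil, List.length_nil, Nat.cast_zero]
      rw [PySem.List.pyRange_one_eq_nil (le_refl 0)]
      have h0 : startJ N 0 = 1 := by
        unfold startJ
        rw [PySem.Int.floordiv_eq_ediv_of_pos (a := (0:Int) * (0 - 1)) (by norm_num)]
        norm_num
      simp [h0]
  | append_singleton l x ih =>
      rw [List.foldl_append]
      have hil : (l.length : Int) ≤ N := by
        simp only [List.length_append, List.length_singleton] at hl; push_cast at hl; omega
      rw [ih hil]
      simp only [List.foldl_cons, List.foldl_nil]
      set i : Int := (l.length : Int) with hi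
      have h0i : 0 ≤ i := by positivity
      have hiN : i < N := by
        simp only [List.length_append, List.length_singleton] at hl; push_cast at hl; omega
      rw [zeros_loop]
      simp only [List.nil_append, PySem.List.length_pyRange_one]
      rw [while_loop]
      have ht : ((N + 1 - (1 + ((i - 0).toNat : Int))).toNat : Int) = N - i := by omega
      rw [ht]
      have hlen : ((l ++ [x]).length : Int) = i + 1 := by simp [hi]
      rw [hlen]
      show (List.map (rowB N) (PySem.List.pyRange 0 i 1) ++
            [List.replicate (i - 0).toNat (0:Int) ++
              PySem.List.pyRange (startJ N i) (startJ N i + (N - i)) 1],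
          i + 1, startJ N i + (N - i))
          = (List.map (rowB N) (PySem.List.pyRange 0 (i + 1) 1), i + 1, startJ N (i + 1))
      have hrowi : List.replicate (i - 0).toNat (0:Int) ++
          PySem.List.pyRange (startJ N i) (startJ N i + (N - i)) 1 = rowB N i := by
        unfold rowB startJ
        rw [PySem.List.pyRepeat_singleton]
        have h1 : (i - 0).toNat = i.toNat := by omega
        have h2 : (1 + i * N - PySem.Int.floordiv (i * (i - 1)) 2) + (N - i)
            = 1 + i * N - PySem.Int.floordiv (i * (i - 1)) 2 + N - i := by ring
        rw [h1, h2]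
      have hmapsucc : List.map (rowB N) (PySem.List.pyRange 0 (i + 1) 1)
          = List.map (rowB N) (PySem.List.pyRange 0 i 1) ++ [rowB N i] := by
        rw [PySem.List.pyRange_one_succ_right (by omega : (0:Int) ≤ i)]
        simp
      rw [hrowi, hmapsucc, startJ_succ]

-- ===== VERDICT (by name: the statement is the Claim_ definition above) =====
theorem pattern3_spec : Claim_equal_pattern3 := by
  intro N _
  unfold Spec_pattern3 pattern3 pattern3_alt
  by_cases hN : 0 ≤ N
  · rw [outer_loop N _ (by simp [PySem.List.length_pyRange_one]; omega)]
    simp only [PySem.List.length_pyRange_one]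
    have h : (((N + 1 - 1).toNat : Int)) = N := by omega
    rw [h]
    rfl
  · rw [PySem.List.pyRange_one_eq_nil (b := N + 1) (by omega)]
    simp [PySem.List.pyRange_one_eq_nil (show N ≤ 0 by omega)]
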